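-- pv_equiv track=rewrite | github.com/jncots/mc_eas_runs | post_process/read_cors_files/job_distributor.py | divide_to_batches
-- ===== SOURCE A (Python) =====
-- def divide_to_batches(num_jobs, num_batches):
--     batch_size = num_jobs//num_batches
--     last_batch_id = num_batches - 1
--
--     job_id_end = 0
--     batches = []
--     for batch_id in range(num_batches):
--         job_id_start = job_id_end
--
--         if batch_id != last_batch_id:
--             job_id_end = job_id_start + batch_size
--         else:
--             job_id_end = num_jobs
--
--         batches.append((batch_id, job_id_start, job_id_end))
--
--     return batches
-- ===== SOURCE B (Python) =====
-- def divide_to_batches(num_jobs, num_batches):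
--     batch_size = num_jobs // num_batches
--     boundaries = [i * batch_size for i in range(num_batches)] + [num_jobs]
--     return [(i, s, e) for i, (s, e) in enumerate(zip(boundaries, boundaries[1:]))]
-- ===== Notes on version B (the rewrite author's own statement) =====
-- stated objective: alternative
-- what changed: replaces A's threaded end-accumulator and last-batch conditional with a precomputed boundaries table (batch start offsets plus a final num_jobs sentinel) paired consecutively via zip/enumerate
import Mathlib
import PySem

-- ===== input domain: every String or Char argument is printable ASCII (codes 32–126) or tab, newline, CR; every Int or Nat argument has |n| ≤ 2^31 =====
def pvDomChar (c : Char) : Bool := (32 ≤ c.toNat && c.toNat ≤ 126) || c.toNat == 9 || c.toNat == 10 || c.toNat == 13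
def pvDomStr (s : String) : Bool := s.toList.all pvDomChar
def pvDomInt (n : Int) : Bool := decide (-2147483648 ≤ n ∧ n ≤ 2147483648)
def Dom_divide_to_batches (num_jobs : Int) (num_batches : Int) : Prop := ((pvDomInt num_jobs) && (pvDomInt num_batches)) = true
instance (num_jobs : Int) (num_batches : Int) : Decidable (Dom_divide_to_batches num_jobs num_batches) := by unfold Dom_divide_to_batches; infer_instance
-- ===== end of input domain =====

-- B replaces A's threaded end-accumulator and last-batch branch by a precomputed
-- boundaries table paired consecutively (alternative decomposition, same cost).


-- ===== PORT A =====
def divide_to_batches (num_jobs : Int) (num_batches : Int) : List (Int × Int × Int) :=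
  let batch_size := PySem.Int.floordiv num_jobs num_batches
  let last_batch_id := num_batches - 1
  let st := (PySem.List.pyRange 0 num_batches 1).foldl
    (fun (st : Int × List (Int × Int × Int)) batch_id =>
      let job_id_start := st.1
      let job_id_end :=
        if batch_id ≠ last_batch_id then job_id_start + batch_size else num_jobs
      (job_id_end, st.2 ++ [(batch_id, job_id_start, job_id_end)]))
    (0, [])
  st.2

-- ===== PORT B =====
def divide_to_batches_alt (num_jobs : Int) (num_batches : Int) : List (Int × Int × Int) :=
  let batch_size := PySem.Int.floordiv num_jobs num_batches
  let boundaries := (PySem.List.pyRange 0 num_batches 1).map (fun i => i * batch_size) ++ [num_jobs]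
  (PySem.List.enumerate (boundaries.zip boundaries.tail)).map (fun p => (p.1, p.2.1, p.2.2))

-- ===== PRECONDITION & SPEC =====
-- Pre_ excludes exactly num_batches = 0, where Python A raises ZeroDivisionError.
def Pre_divide_to_batches (num_jobs : Int) (num_batches : Int) : Prop := num_batches ≠ 0
instance (num_jobs : Int) (num_batches : Int) : Decidable (Pre_divide_to_batches num_jobs num_batches) := by unfold Pre_divide_to_batches; infer_instance
def pvWitness_divide_to_batches : Int × Int := (10, 3)

def Spec_divide_to_batches (num_jobs : Int) (num_batches : Int) (out : List (Int × Int × Int)) : Prop := out = divide_to_batches_alt num_jobs num_batches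
instance (num_jobs : Int) (num_batches : Int) (out : List (Int × Int × Int)) : Decidable (Spec_divide_to_batches num_jobs num_batches out) := by unfold Spec_divide_to_batches; infer_instance

-- ===== CLAIM (what is proved, stated in full; the proofs are below) =====
def Claim_equal_divide_to_batches : Prop := ∀ (num_jobs : Int) (num_batches : Int), Dom_divide_to_batches num_jobs num_batches → Pre_divide_to_batches num_jobs num_batches → Spec_divide_to_batches num_jobs num_batches (divide_to_batches num_jobs num_batches)

-- ===== LEMMAS AND PROOFS =====

-- canonical closed form both sides are reduced to
def pvRow (num_jobs num_batches bs k : Int) : Int × Int × Int :=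
  (k, k * bs, if k + 1 = num_batches then num_jobs else (k + 1) * bs)

def pvCanon (num_jobs num_batches bs : Int) : List (Int × Int × Int) :=
  (PySem.List.pyRange 0 num_batches 1).map (pvRow num_jobs num_batches bs)

theorem pvZip_getElem? {a b : Type} (as : List a) (bs : List b) (i : Nat)
    (x : a) (y : b) (hx : as[i]? = some x) (hy : bs[i]? = some y) :
    (as.zip bs)[i]? = some (x, y) := by
  rw [List.getElem?_eq_some_iff] at hx hy
  obtain ⟨h1, h2⟩ := hx; obtain ⟨h3, h4⟩ := hy
  rw [List.getElem?_eq_getElem (by simp [List.length_zip]; omega)]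
  simp [List.getElem_zip, h2, h4]

-- A's fold over the first m indices (all strictly below the last one)
-- yields state (m*bs, the first m rows, none of them the last batch).
theorem pvA_fold_inv (num_jobs bs last : Int) (m : Int)
    (h0 : 0 ≤ m) (hm : m ≤ last) :
    (PySem.List.pyRange 0 m 1).foldl
      (fun (st : Int × List (Int × Int × Int)) batch_id =>
        (if batch_id ≠ last then st.1 + bs else num_jobs,
          st.2 ++ [(batch_id, st.1, if batch_id ≠ last then st.1 + bs else num_jobs)]))
      (0, []) =
    (m * bs,
      (PySem.List.pyRange 0 m 1).map (fun k => (k, k * bs, (k + 1) * bs))) := by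
  revert hm
  induction m, h0 using Int.le_induction with
  | base => intro _; simp [PySem.List.pyRange_one_eq_nil]
  | succ n hn ih =>
    intro hm
    have hn' : n ≤ last := by omega
    rw [PySem.List.pyRange_one_succ_right hn, List.foldl_append, ih hn',
        List.map_append]
    have h1 : n ≠ last := by omega
    simp [h1]
    ring

theorem pvA_eq_canon (num_jobs num_batches : Int)  :
    divide_to_batches num_jobs num_batches =
      pvCanon num_jobs num_batches (PySem.Int.floordiv num_jobs num_batches) := by
  unfold divide_to_batches pvCanon
  set bs := PySem.Int.floordiv num_jobs num_batches with hbs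
  by_cases hpos : 0 < num_batches
  · obtain ⟨p, hp, hp0⟩ : ∃ p, num_batches = p + 1 ∧ 0 ≤ p :=
      ⟨num_batches - 1, by ring, by omega⟩
    dsimp only
    rw [hp, PySem.List.pyRange_one_succ_right hp0, List.foldl_append,
        (by ring : p + 1 - 1 = p),
        pvA_fold_inv num_jobs bs p p hp0 le_rfl, List.map_append]
    simp only [List.foldl_cons, List.foldl_nil, ne_eq, not_true_eq_false, if_false]
    have hmap : (PySem.List.pyRange 0 p 1).map (fun k => (k, k * bs, (k + 1) * bs))
        = (PySem.List.pyRange 0 p 1).map (pvRow num_jobs (p + 1) bs) := by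
      refine List.map_congr_left (fun k hk => ?_)
      have hkp := (PySem.List.mem_pyRange_one).1 hk
      have hne : ¬ (k + 1 = p + 1) := by omega
      simp [pvRow, hne]
    rw [hmap]
    simp [pvRow]
  · dsimp only
    rw [PySem.List.pyRange_one_eq_nil (by omega)]
    simp

theorem pvB_eq_canon (num_jobs num_batches : Int)  :
    divide_to_batches_alt num_jobs num_batches =
      pvCanon num_jobs num_batches (PySem.Int.floordiv num_jobs num_batches) := by
  unfold divide_to_batches_alt pvCanon
  set bs := PySem.Int.floordiv num_jobs num_batches with hbs
  set bd := (PySem.List.pyRange 0 num_batches 1).map (fun i => i * bs) ++ [num_jobs]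
    with hbd
  have hlen : bd.length = num_batches.toNat + 1 := by
    simp [hbd, PySem.List.length_pyRange_one]
  have hget : ∀ (k : Nat), k < num_batches.toNat → bd[k]? = some ((k : Int) * bs) := by
    intro k hk
    rw [hbd, List.getElem?_append_left (by simpa [PySem.List.length_pyRange_one] using hk),
        List.getElem?_map, PySem.List.getElem?_pyRange_one]
    simp [hk]
  have hgetLast : bd[num_batches.toNat]? = some num_jobs := by
    rw [hbd, List.getElem?_append_right (by simp [PySem.List.length_pyRange_one])]
    simp [PySem.List.length_pyRange_one]
  apply List.ext_getElem?
  intro k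
  by_cases hk : k < num_batches.toNat
  · have htail : bd.tail[k]? = bd[k + 1]? := List.getElem?_tail
    have hz : (bd.zip bd.tail)[k]? = some ((k : Int) * bs,
        if k + 1 < num_batches.toNat then ((k : Int) + 1) * bs else num_jobs) := by
      by_cases hk1 : k + 1 < num_batches.toNat
      · refine pvZip_getElem? _ _ _ _ _ (hget k hk) ?_
        rw [htail, hget (k + 1) hk1]
        simp [hk1]
      · have hke : k + 1 = num_batches.toNat := by omega
        refine pvZip_getElem? _ _ _ _ _ (hget k hk) ?_
        rw [htail, hke, hgetLast]
        simp
    rw [List.getElem?_map, PySem.List.getElem?_enumerate, hz,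
        List.getElem?_map, PySem.List.getElem?_pyRange_one]
    have hkb : k < (num_batches - 0).toNat := by omega
    simp only [hkb, if_pos]
    by_cases hk1 : k + 1 < num_batches.toNat
    · have : ¬ ((0 : Int) + (k : Int) + 1 = num_batches) := by omega
      simp [pvRow, hk1]
      intro h'
      exact absurd h' (by omega)
    · simp [pvRow, hk1]
      intro h'
      exact absurd (by omega : (k : Int) + 1 = num_batches) h'
  · rw [List.getElem?_eq_none, List.getElem?_eq_none]
    · simp [PySem.List.length_pyRange_one]; omega
    · simp [PySem.List.length_enumerate, List.length_zip, List.length_tail]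
      omega

-- ===== VERDICT (by name: the statement is the Claim_ definition above) =====
theorem divide_to_batches_spec : Claim_equal_divide_to_batches := by
  intro nj nb _ _
  unfold Spec_divide_to_batches
  rw [pvA_eq_canon nj nb, pvB_eq_canon nj nb]
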